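-- pv_equiv track=rewrite | github.com/yeomja99/BOJ | 프로그래머스/3/60062. 외벽 점검/외벽 점검.py | solution
-- ===== SOURCE A (Python) =====
-- from itertools import permutations
--
-- def solution(n, weak, dist):
--     answer = 0
--     linear_weak = []
--     # 원으로 된 벽을 1자로 펴서 weak 표현하기
--         # 1, 5, 6, 10
--         # 5, 6, 10, 1
--         # 6, 10, 1, 5
--         # 10, 1, 6, 5
--         # 위와 같이 반복되므로 한 줄로 펴주면 됨
--     for i in range(len(weak)*2-1):
--         if i < len(weak): linear_weak.append(weak[i])
--         else:
--             linear_weak.append(weak[i-len(weak)]+n)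
--
--     # 순열로 나갈 애들 정하기
--     for i in range(1, len(dist)+1):
--         # 나갈 애들 정하기
--         permus = list(permutations(dist, i))
--         permus.sort(reverse=True)
--         # 보고 올 수 있는지 확인하기
--         for permu in permus:
--             for j in range(len(weak)):
--                 line = linear_weak[j:len(weak)+j]
--                 for p in permu:
--                     coverage = line[0] + p
--                     cnt = 0
--                     for l in line:
--                         if l <= coverage: cnt+=1
--                     if cnt >= len(line): return i
--                     else: line = line[cnt:]
--
--
--
--     return -1
-- ===== SOURCE B (Python) =====
-- def solution(n, weak, dist):
--     W = len(weak)
--     # circular wall doubled, so rotation j is lin[j:j+W]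
--     lin = weak + [w + n for w in weak]
--     # try friends with the longest range first
--     avail0 = sorted(dist, reverse=True)
--
--     def step(line, t, p):
--         # friend of range p starts at line[t]; new offset into line
--         rem = line[t:]
--         cov = rem[0] + p
--         return t + sum(1 for l in rem if l <= cov)
--
--     def dfs(ts, avail, budget):
--         # ts[j]: current offset in rotation j; one search tree shared by all rotations
--         if budget == 0:
--             return False
--         for k in range(len(avail)):
--             p = avail[k]
--             ts2 = []
--             for j in range(W):
--                 t2 = step(lin[j:j + W], ts[j], p)
--                 if t2 >= W:
--                     return True
--                 ts2.append(t2)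
--             if dfs(ts2, avail[:k] + avail[k + 1:], budget - 1):
--                 return True
--         return False
--
--     for i in range(1, len(dist) + 1):
--         if dfs([0] * W, avail0, i):
--             return i
--     return -1
-- ===== Notes on version B (the rewrite author's own statement) =====
-- stated objective: alternative
-- what changed: B replaces A's per-size materialise-all-i-permutations-then-sort-then-recheck loop by one backtracking depth-first search that picks still-available friends in descending range order and carries the offsets of all wall rotations together, sharing common prefixes and never building or sorting a permutation list; it also builds the doubled wall directly instead of A's index-by-index append loop.
import Mathlib
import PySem

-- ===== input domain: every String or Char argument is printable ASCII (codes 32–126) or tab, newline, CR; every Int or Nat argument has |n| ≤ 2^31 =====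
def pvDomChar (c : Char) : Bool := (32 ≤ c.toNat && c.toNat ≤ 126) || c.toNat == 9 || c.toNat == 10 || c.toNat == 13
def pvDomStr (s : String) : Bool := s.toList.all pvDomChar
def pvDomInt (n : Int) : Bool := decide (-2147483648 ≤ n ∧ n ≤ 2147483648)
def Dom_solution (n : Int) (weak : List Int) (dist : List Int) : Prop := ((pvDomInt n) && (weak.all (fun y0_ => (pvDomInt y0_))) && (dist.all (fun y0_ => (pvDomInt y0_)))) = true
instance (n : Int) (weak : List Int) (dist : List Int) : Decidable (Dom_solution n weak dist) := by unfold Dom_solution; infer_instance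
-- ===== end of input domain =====

-- B replaces A's per-size materialise-all-permutations-then-sort loop by one backtracking
-- depth-first search (friends in descending range order, offsets into all wall rotations
-- carried together, shared prefixes, no permutation list); same return value on every input.

-- ===== PORT A =====

-- the 'linear_weak' building loop of A (indices are always in range; getD's default is never used)
def pvLinear (n : Int) (weak : List Int) : List Int :=
  (List.range (weak.length * 2 - 1)).foldl
    (fun acc i =>
      if i < weak.length then acc ++ [weak.getD i 0]
      else acc ++ [weak.getD (i - weak.length) 0 + n]) []

-- itertools.permutations(xs, i): pick each position k first (index-lexicographic order)
def pvPerms : List Int → Nat → List (List Int)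
  | _, 0 => [[]]
  | xs, (i+1) =>
      (List.range xs.length).flatMap
        (fun k => (pvPerms (xs.eraseIdx k) i).map (fun q => xs.getD k 0 :: q))

-- A's inner 'for p in permu' greedy check ('line[0]' is safe: the line is never empty here)
def pvTryPerm : List Int → List Int → Bool
  | _, [] => false
  | line, p :: rest =>
      let coverage := line.headI + p
      let cnt := line.countP (fun l => decide (l ≤ coverage))
      if line.length ≤ cnt then true else pvTryPerm (line.drop cnt) rest

def solution (n : Int) (weak : List Int) (dist : List Int) : Int :=
  match (PySem.List.pyRange 1 ((dist.length : Int) + 1) 1).find? (fun i =>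
      (PySem.List.sorted (pvPerms dist i.toNat) (fun x => x) true).any (fun permu =>
        (List.range weak.length).any (fun j =>
          pvTryPerm (PySem.List.slice (pvLinear n weak) (some (j : Int)) (some ((weak.length : Int) + (j : Int)))) permu))) with
  | some i => i
  | none => -1

-- ===== PORT B =====

-- the circular wall doubled: rotation j is lin[j:j+W]
def pvLin (n : Int) (weak : List Int) : List Int :=
  weak ++ weak.map (fun w => w + n)

-- a friend of range p starts at line[t]; the new offset into line
def pvStep (line : List Int) (t : Nat) (p : Int) : Nat :=
  let rem := line.drop t
  t + rem.countP (fun l => decide (l ≤ rem.headI + p))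

-- one search tree shared by all rotations: ts[j] is the current offset in rotation j;
-- the Python 'for j' loop with its early 'return True' is the 'any' (the break),
-- and the map rebuilds ts2 when no rotation finished
def pvDfs (lin : List Int) (W : Nat) : List Nat → List Int → Nat → Bool
  | _, _, 0 => false
  | ts, avail, (b+1) =>
      (List.range avail.length).any (fun k =>
        if (List.range W).any (fun (j : Nat) =>
            decide (W ≤ pvStep (PySem.List.slice lin (some (j : Int)) (some ((W : Int) + (j : Int)))) (ts.getD j 0) (avail.getD k 0))) then true
        else pvDfs lin W
          ((List.range W).map (fun (j : Nat) =>
            pvStep (PySem.List.slice lin (some (j : Int)) (some ((W : Int) + (j : Int)))) (ts.getD j 0) (avail.getD k 0)))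
          (avail.eraseIdx k) b)

def solution_alt (n : Int) (weak : List Int) (dist : List Int) : Int :=
  match (PySem.List.pyRange 1 ((dist.length : Int) + 1) 1).find? (fun i =>
      pvDfs (pvLin n weak) weak.length (List.replicate weak.length 0)
        (PySem.List.sorted dist (fun x => x) true) i.toNat) with
  | some i => i
  | none => -1

-- ===== PRECONDITION & SPEC =====
def Spec_solution (n : Int) (weak : List Int) (dist : List Int) (out : Int) : Prop := out = solution_alt n weak dist
instance (n : Int) (weak : List Int) (dist : List Int) (out : Int) : Decidable (Spec_solution n weak dist out) := by unfold Spec_solution; infer_instance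

-- ===== CLAIM (what is proved, stated in full; the proofs are below) =====
def Claim_equal_solution : Prop := ∀ (n : Int) (weak : List Int) (dist : List Int), Dom_solution n weak dist → Spec_solution n weak dist (solution n weak dist)

-- ===== LEMMAS AND PROOFS =====

theorem pv_any_congr_mem {α : Type} {l : List α} {p q : α → Bool}
    (h : ∀ x ∈ l, p x = q x) : l.any p = l.any q := by
  induction l with
  | nil => rfl
  | cons a t ih =>
    simp only [List.any_cons]
    rw [h a (List.mem_cons_self), ih (fun x hx => h x (List.mem_cons_of_mem _ hx))]

theorem pv_find?_congr_mem {α : Type} {l : List α} {p q : α → Bool}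
    (h : ∀ x ∈ l, p x = q x) : l.find? p = l.find? q := by
  induction l with
  | nil => rfl
  | cons a t ih =>
    rw [List.find?_cons, List.find?_cons, h a (List.mem_cons_self),
        ih (fun x hx => h x (List.mem_cons_of_mem _ hx))]

theorem pv_any_perm {α : Type} {l m : List α} (h : l.Perm m) (p : α → Bool) :
    l.any p = m.any p := by
  rcases hb : m.any p with _ | _ <;>
  · simp only [List.any_eq_true, List.any_eq_false] at *
    first
    | exact fun x hx => hb x (h.mem_iff.mp hx)
    | obtain ⟨x, hx, hpx⟩ := hb; exact ⟨x, h.mem_iff.mpr hx, hpx⟩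

theorem pv_any_eq_of_mem_iff {α : Type} {l m : List α}
    (h : ∀ x, x ∈ l ↔ x ∈ m) (p : α → Bool) : l.any p = m.any p := by
  rcases hb : m.any p with _ | _ <;>
  · simp only [List.any_eq_true, List.any_eq_false] at *
    first
    | exact fun x hx => hb x ((h x).mp hx)
    | obtain ⟨x, hx, hpx⟩ := hb; exact ⟨x, (h x).mpr hx, hpx⟩

theorem pv_exists_mem_perms : ∀ (b : Nat) (xs : List Int), b ≤ xs.length → ∃ q, q ∈ pvPerms xs b := by
  intro b
  induction b with
  | zero => intro xs _; exact ⟨[], by simp [pvPerms]⟩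
  | succ b ih =>
    intro xs hb
    have hlen : 0 < xs.length := by omega
    have h1 : b ≤ (xs.eraseIdx 0).length := by
      rw [List.length_eraseIdx_of_lt hlen]; omega
    obtain ⟨q, hq⟩ := ih (xs.eraseIdx 0) h1
    refine ⟨xs.getD 0 0 :: q, ?_⟩
    simp only [pvPerms, List.mem_flatMap]
    exact ⟨0, by simpa using hlen, List.mem_map.mpr ⟨q, hq, rfl⟩⟩

-- picking index k first and then a permutation of the rest is a permutation of the whole
theorem pv_cons_eraseIdx_perm {xs : List Int} {k : Nat} (hk : k < xs.length) :
    (xs[k] :: xs.eraseIdx k).Perm xs := by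
  conv_rhs => rw [← List.take_append_drop k xs, List.drop_eq_getElem_cons hk]
  rw [List.eraseIdx_eq_take_drop_succ]
  exact List.perm_middle.symm

-- membership in pvPerms is exactly: right length and sub-permutation of the base list
theorem pv_mem_perms : ∀ (b : Nat) (xs q : List Int),
    q ∈ pvPerms xs b ↔ q.length = b ∧ q.Subperm xs := by
  intro b
  induction b with
  | zero =>
    intro xs q
    simp only [pvPerms, List.mem_singleton]
    constructor
    · rintro rfl; exact ⟨rfl, List.nil_subperm⟩
    · rintro ⟨hl, _⟩; exact List.eq_nil_of_length_eq_zero hl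
  | succ b ih =>
    intro xs q
    simp only [pvPerms, List.mem_flatMap, List.mem_map, List.mem_range]
    constructor
    · rintro ⟨k, hk, q', hq', rfl⟩
      obtain ⟨hl, hsub⟩ := (ih _ _).mp hq'
      refine ⟨by simp [hl], ?_⟩
      rw [List.getD_eq_getElem _ _ hk]
      exact ((List.subperm_cons _).mpr hsub).trans (pv_cons_eraseIdx_perm hk).subperm
    · rintro ⟨hl, hsub⟩
      match q, hl with
      | x :: q', hl =>
        have hl' : q'.length = b := by simp only [List.length_cons] at hl; omega
        have hx : x ∈ xs := hsub.subset List.mem_cons_self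
        have hk : xs.idxOf x < xs.length := List.idxOf_lt_length_of_mem hx
        refine ⟨xs.idxOf x, hk, q', ?_, ?_⟩
        · refine (ih _ _).mpr ⟨hl', ?_⟩
          have h1 : q'.Subperm ((x :: q').erase x) := by rw [List.erase_cons_head]
          have h2 := (h1.trans (hsub.erase x))
          rwa [List.erase_eq_eraseIdx_of_idxOf rfl] at h2
        · rw [List.getD_eq_getElem _ _ hk, List.getElem_idxOf hk]

-- the set of picked sequences only depends on the base list up to permutation
theorem pv_any_perms_base {xs ys : List Int} (h : xs.Perm ys) (b : Nat) (P : List Int → Bool) :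
    (pvPerms xs b).any P = (pvPerms ys b).any P := by
  refine pv_any_eq_of_mem_iff (fun q => ?_) P
  rw [pv_mem_perms, pv_mem_perms, h.subperm_left]

theorem pv_getD_map_range {f : Nat → Nat} {W j : Nat} (h : j < W) :
    ((List.range W).map f).getD j 0 = f j := by
  rw [List.getD_eq_getElem _ _ (by simpa using h)]
  simp

theorem pv_foldl_append (f : Nat → Int) (g : List Int → Nat → List Int)
    (hg : ∀ acc i, g acc i = acc ++ [f i]) :
    ∀ (l : List Nat) (init : List Int), l.foldl g init = init ++ l.map f := by
  intro l
  induction l with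
  | nil => simp
  | cons a t ih => intro init; simp [List.foldl_cons, hg, ih]

theorem pv_map_range_getD (xs : List Int) :
    (List.range xs.length).map (fun i => xs.getD i 0) = xs := by
  apply List.ext_getElem
  · simp
  · intro i h1 h2
    simp only [List.getElem_map, List.getElem_range]
    rw [List.getD_eq_getElem]

theorem pv_linear_eq (n : Int) (weak : List Int) :
    pvLinear n weak = weak ++ (weak.take (weak.length - 1)).map (fun w => w + n) := by
  unfold pvLinear
  rw [pv_foldl_append (fun i => if i < weak.length then weak.getD i 0
        else weak.getD (i - weak.length) 0 + n) _ (fun acc i => by by_cases h : i < weak.length <;> simp [h])]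
  rw [List.nil_append]
  rcases Nat.eq_zero_or_pos weak.length with h0 | hpos
  · simp [List.eq_nil_of_length_eq_zero h0]
  · have hsplit : weak.length * 2 - 1 = weak.length + (weak.length - 1) := by omega
    rw [hsplit, List.range_add, List.map_append]
    congr 1
    · conv_rhs => rw [← pv_map_range_getD weak]
      refine List.map_congr_left (fun i hi => ?_)
      have : i < weak.length := List.mem_range.mp hi
      simp [this]
    · rw [List.map_map]
      apply List.ext_getElem
      · simp
      · intro i h1 h2
        simp only [List.length_map, List.length_range] at h1
        simp only [List.getElem_map, List.getElem_range, Function.comp]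
        have hcond : ¬ (weak.length + i < weak.length) := by omega
        rw [if_neg hcond]
        have : weak.length + i - weak.length = i := by omega
        rw [this]
        rw [List.getElem_take, List.getD_eq_getElem _ _ (by omega)]

-- A's slice of the (2W-1)-long linear wall is rotation j
theorem pv_slice_eq_rotation (n : Int) (weak : List Int) (j : Nat) (hj : j < weak.length) :
    PySem.List.slice (pvLinear n weak) (some (j : Int)) (some ((weak.length : Int) + (j : Int))) =
      weak.drop j ++ (weak.take j).map (fun w => w + n) := by
  have hcast : ((weak.length : Int) + (j : Int)) = ((weak.length + j : Nat) : Int) := by push_cast; ring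
  rw [hcast, PySem.List.slice_natCast, pv_linear_eq]
  have hdrop : ((weak ++ (weak.take (weak.length - 1)).map (fun w => w + n)).drop j)
      = weak.drop j ++ (weak.take (weak.length - 1)).map (fun w => w + n) :=
    List.drop_append_of_le_length (by omega)
  rw [hdrop]
  have hlen : (weak.drop j).length = weak.length - j := List.length_drop ..
  have htake : weak.length + j - j = weak.length := by omega
  rw [htake, List.take_append, hlen]
  have h1 : (weak.drop j).take weak.length = weak.drop j := List.take_of_length_le (by omega)
  have h2 : weak.length - (weak.length - j) = j := by omega
  rw [h1, h2, List.map_take, List.take_take]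
  have h3 : min j (weak.length - 1) = j := by omega
  rw [h3]
  rw [List.map_take]

-- B's slice of the doubled wall is the same rotation j
theorem pv_slice_lin (n : Int) (weak : List Int) (j : Nat) (hj : j < weak.length) :
    PySem.List.slice (pvLin n weak) (some (j : Int)) (some ((weak.length : Int) + (j : Int))) =
      weak.drop j ++ (weak.take j).map (fun w => w + n) := by
  have hcast : ((weak.length : Int) + (j : Int)) = ((weak.length + j : Nat) : Int) := by push_cast; ring
  rw [hcast, PySem.List.slice_natCast]
  unfold pvLin
  rw [List.drop_append_of_le_length (by omega)]
  have hlen : (weak.drop j).length = weak.length - j := List.length_drop ..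
  have htake : weak.length + j - j = weak.length := by omega
  rw [htake, List.take_append, hlen]
  have h1 : (weak.drop j).take weak.length = weak.drop j := List.take_of_length_le (by omega)
  have h2 : weak.length - (weak.length - j) = j := by omega
  rw [h1, h2]
  rw [List.map_take]

theorem pv_rot_length (n : Int) (weak : List Int) (j : Nat) (hj : j < weak.length) :
    (weak.drop j ++ (weak.take j).map (fun w => w + n)).length = weak.length := by
  simp only [List.length_append, List.length_drop, List.length_map, List.length_take]
  omega

-- the shared DFS finds a cover within b picks iff some picked sequence covers some rotation
theorem pv_dfs_eq (n : Int) (weak : List Int) :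
    ∀ (b : Nat) (ts : List Nat) (avail : List Int), b ≤ avail.length →
      (∀ j, j < weak.length → ts.getD j 0 ≤ weak.length) →
      pvDfs (pvLin n weak) weak.length ts avail b
        = (pvPerms avail b).any (fun q =>
            (List.range weak.length).any (fun j =>
              pvTryPerm ((weak.drop j ++ (weak.take j).map (fun w => w + n)).drop (ts.getD j 0)) q)) := by
  intro b
  induction b with
  | zero => intro ts avail _ _; simp [pvDfs, pvPerms, pvTryPerm]
  | succ b ih =>
    intro ts avail hb hts
    simp only [pvDfs, pvPerms, List.any_flatMap, List.any_map]
    refine pv_any_congr_mem (fun k hk => ?_)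
    have hk' : k < avail.length := List.mem_range.mp hk
    have herase : (avail.eraseIdx k).length = avail.length - 1 :=
      List.length_eraseIdx_of_lt hk'
    have hbe : b ≤ (avail.eraseIdx k).length := by omega
    -- rewrite the slices of the doubled wall into rotations
    have hsl : ∀ j, j < weak.length →
        PySem.List.slice (pvLin n weak) (some (j : Int)) (some ((weak.length : Int) + (j : Int)))
          = weak.drop j ++ (weak.take j).map (fun w => w + n) := pv_slice_lin n weak
    have hcondeq : ((List.range weak.length).any (fun (j : Nat) =>
        decide (weak.length ≤ pvStep (PySem.List.slice (pvLin n weak) (some (j : Int)) (some ((weak.length : Int) + (j : Int)))) (ts.getD j 0) (avail.getD k 0))))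
        = ((List.range weak.length).any (fun (j : Nat) =>
        decide (weak.length ≤ pvStep (weak.drop j ++ (weak.take j).map (fun w => w + n)) (ts.getD j 0) (avail.getD k 0)))) :=
      pv_any_congr_mem (fun j hj => by rw [hsl j (List.mem_range.mp hj)])
    have hmapeq : ((List.range weak.length).map (fun (j : Nat) =>
        pvStep (PySem.List.slice (pvLin n weak) (some (j : Int)) (some ((weak.length : Int) + (j : Int)))) (ts.getD j 0) (avail.getD k 0)))
        = ((List.range weak.length).map (fun (j : Nat) =>
        pvStep (weak.drop j ++ (weak.take j).map (fun w => w + n)) (ts.getD j 0) (avail.getD k 0))) :=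
      List.map_congr_left (fun j hj => by rw [hsl j (List.mem_range.mp hj)])
    rw [hcondeq, hmapeq]
    set p := avail.getD k 0 with hp
    by_cases hc : (List.range weak.length).any (fun j =>
        decide (weak.length ≤ pvStep (weak.drop j ++ (weak.take j).map (fun w => w + n)) (ts.getD j 0) p)) = true
    · rw [if_pos hc]
      symm
      rw [List.any_eq_true]
      obtain ⟨q, hq⟩ := pv_exists_mem_perms b (avail.eraseIdx k) hbe
      refine ⟨q, hq, ?_⟩
      simp only [Function.comp_apply]
      rw [List.any_eq_true] at hc ⊢
      obtain ⟨j, hjm, hcj⟩ := hc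
      have hjlt : j < weak.length := List.mem_range.mp hjm
      refine ⟨j, hjm, ?_⟩
      simp only [decide_eq_true_eq] at hcj
      simp only [pvTryPerm]
      rw [if_pos ?_]
      have hrl := pv_rot_length n weak j hjlt
      have hdl : ((weak.drop j ++ (weak.take j).map (fun w => w + n)).drop (ts.getD j 0)).length
          = weak.length - ts.getD j 0 := by rw [List.length_drop, hrl]
      have hstep : pvStep (weak.drop j ++ (weak.take j).map (fun w => w + n)) (ts.getD j 0) p
          = ts.getD j 0 + ((weak.drop j ++ (weak.take j).map (fun w => w + n)).drop (ts.getD j 0)).countP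
              (fun l => decide (l ≤ ((weak.drop j ++ (weak.take j).map (fun w => w + n)).drop (ts.getD j 0)).headI + p)) := rfl
      rw [hstep] at hcj
      have := hts j hjlt
      omega
    · rw [if_neg hc]
      have hts2 : ∀ j, j < weak.length →
          ((List.range weak.length).map (fun j =>
            pvStep (weak.drop j ++ (weak.take j).map (fun w => w + n)) (ts.getD j 0) p)).getD j 0
            ≤ weak.length := by
        intro j hjlt
        rw [pv_getD_map_range hjlt]
        rw [Bool.not_eq_true, List.any_eq_false] at hc
        have := hc j (List.mem_range.mpr hjlt)
        simp only [decide_eq_true_eq] at this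
        omega
      rw [ih _ (avail.eraseIdx k) hbe hts2]
      refine pv_any_congr_mem (fun q _ => ?_)
      simp only [Function.comp_apply]
      refine pv_any_congr_mem (fun j hjm => ?_)
      have hjlt : j < weak.length := List.mem_range.mp hjm
      rw [pv_getD_map_range hjlt]
      rw [Bool.not_eq_true, List.any_eq_false] at hc
      have hcj := hc j (List.mem_range.mpr hjlt)
      simp only [decide_eq_true_eq] at hcj
      have hrl := pv_rot_length n weak j hjlt
      have hstep : pvStep (weak.drop j ++ (weak.take j).map (fun w => w + n)) (ts.getD j 0) p
          = ts.getD j 0 + ((weak.drop j ++ (weak.take j).map (fun w => w + n)).drop (ts.getD j 0)).countP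
              (fun l => decide (l ≤ ((weak.drop j ++ (weak.take j).map (fun w => w + n)).drop (ts.getD j 0)).headI + p)) := rfl
      simp only [pvTryPerm]
      rw [if_neg ?_, List.drop_drop, hstep]
      · have hdl : ((weak.drop j ++ (weak.take j).map (fun w => w + n)).drop (ts.getD j 0)).length
            = weak.length - ts.getD j 0 := by rw [List.length_drop, hrl]
        rw [hstep] at hcj
        have := hts j hjlt
        omega

-- the per-size predicates of the two programs agree for every admissible size i
theorem pv_pred_eq (n : Int) (weak dist : List Int) (i : Int)
    (hi : i ∈ PySem.List.pyRange 1 ((dist.length : Int) + 1) 1) :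
    (PySem.List.sorted (pvPerms dist i.toNat) (fun x => x) true).any (fun permu =>
        (List.range weak.length).any (fun j =>
          pvTryPerm (PySem.List.slice (pvLinear n weak) (some (j : Int)) (some ((weak.length : Int) + (j : Int)))) permu))
      = pvDfs (pvLin n weak) weak.length (List.replicate weak.length 0)
          (PySem.List.sorted dist (fun x => x) true) i.toNat := by
  have hmem := (PySem.List.mem_pyRange_one).mp hi
  have hsp : (PySem.List.sorted dist (fun x => x) true).Perm dist := PySem.List.sorted_perm _ _ _
  have hle : i.toNat ≤ (PySem.List.sorted dist (fun x => x) true).length := by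
    rw [hsp.length_eq]; omega
  rw [pv_dfs_eq n weak i.toNat (List.replicate weak.length 0)
      (PySem.List.sorted dist (fun x => x) true) hle
      (fun j hj => by rw [List.getD_replicate] <;> omega)]
  rw [pv_any_perm (PySem.List.sorted_perm (pvPerms dist i.toNat) _ _)]
  rw [pv_any_perms_base hsp.symm i.toNat]
  refine pv_any_congr_mem (fun q _ => ?_)
  refine pv_any_congr_mem (fun j hjm => ?_)
  have hjlt : j < weak.length := List.mem_range.mp hjm
  rw [pv_slice_eq_rotation n weak j hjlt]
  rw [List.getD_replicate 0 hjlt, List.drop_zero]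

-- ===== VERDICT (by name: the statement is the Claim_ definition above) =====
theorem solution_spec : Claim_equal_solution := by
  intro n weak dist _
  unfold Spec_solution solution solution_alt
  rw [pv_find?_congr_mem (fun i hi => pv_pred_eq n weak dist i hi)]
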